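-- pv_equiv track=rewrite | github.com/lubiku35/codewars_2023 | python/6kyu/add_all/script.py | add_all
-- ===== SOURCE A (Python) =====
-- def add_all(lst):
--     x = lst[0]
--     cumulatives = []
--     for i in range(1, len(lst)):
--         x += lst[i]
--         cumulative_sum = x
--         cumulatives.append(cumulative_sum)
--     return cumulatives
-- ===== SOURCE B (Python) =====
-- def add_all(lst):
--     first = lst[0]
--     return [first + sum(lst[1:i + 1]) for i in range(1, len(lst))]
-- ===== Notes on version B (the rewrite author's own statement) =====
-- stated objective: alternative
-- what changed: Replaces the single running-accumulator loop with a comprehension that recomputes each cumulative sum independently from a prefix slice of the list.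
import Mathlib
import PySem

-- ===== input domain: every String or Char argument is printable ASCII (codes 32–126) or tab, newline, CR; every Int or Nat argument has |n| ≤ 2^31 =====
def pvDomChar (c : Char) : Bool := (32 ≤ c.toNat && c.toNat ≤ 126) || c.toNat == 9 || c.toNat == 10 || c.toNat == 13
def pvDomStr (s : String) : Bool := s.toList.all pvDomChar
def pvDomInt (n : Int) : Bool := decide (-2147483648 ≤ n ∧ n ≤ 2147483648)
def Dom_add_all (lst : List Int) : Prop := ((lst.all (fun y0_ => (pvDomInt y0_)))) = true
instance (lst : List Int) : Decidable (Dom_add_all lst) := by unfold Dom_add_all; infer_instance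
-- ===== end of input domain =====

-- B replaces A's running-accumulator loop by recomputing each cumulative sum independently from a prefix slice (alternative decomposition).

-- ===== PORT A =====
-- x = lst[0]; for i in range(1, len(lst)): x += lst[i]; cumulatives.append(x)
def add_all (lst : List Int) : List Int :=
  let x := PySem.List.pyGetD lst 0 0   -- lst[0]; Pre_add_all excludes the empty list, where Python raises IndexError
  ((PySem.List.pyRange 1 (lst.length : Int) 1).foldl
    (fun (st : Int × List Int) i =>
      (st.1 + PySem.List.pyGetD lst i 0, st.2 ++ [st.1 + PySem.List.pyGetD lst i 0])) (x, [])).2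

-- ===== PORT B =====
-- first = lst[0]; [first + sum(lst[1:i+1]) for i in range(1, len(lst))]
def add_all_alt (lst : List Int) : List Int :=
  let first := PySem.List.pyGetD lst 0 0   -- lst[0]; Pre_add_all excludes the empty list, where Python raises IndexError
  (PySem.List.pyRange 1 (lst.length : Int) 1).map
    (fun i => first + (PySem.List.slice lst (some 1) (some (i + 1))).sum)

-- ===== PRECONDITION & SPEC =====
-- Both A and B raise IndexError at lst[0] on the empty list; Pre_ excludes exactly that input.
def Pre_add_all (lst : List Int) : Prop := lst ≠ []
instance (lst : List Int) : Decidable (Pre_add_all lst) := by unfold Pre_add_all; infer_instance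
def pvWitness_add_all : List Int := [3, 1, 4, 1, 5]

def Spec_add_all (lst : List Int) (out : List Int) : Prop := out = add_all_alt lst
instance (lst : List Int) (out : List Int) : Decidable (Spec_add_all lst out) := by unfold Spec_add_all; infer_instance

-- ===== CLAIM (what is proved, stated in full; the proofs are below) =====
def Claim_equal_add_all : Prop := ∀ (lst : List Int), Dom_add_all lst → Pre_add_all lst → Spec_add_all lst (add_all lst)

-- ===== LEMMAS AND PROOFS =====

-- A's loop invariant: after the first m steps, x holds h plus the sum of the first m tail
-- elements, and the accumulator holds all the intermediate cumulative sums.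
theorem add_all_foldl_inv (h : Int) (t : List Int) (m : Nat) (hm : m ≤ t.length) :
    (PySem.List.pyRange 1 (1 + (m : Int)) 1).foldl
      (fun (st : Int × List Int) i =>
        (st.1 + PySem.List.pyGetD (h :: t) i 0, st.2 ++ [st.1 + PySem.List.pyGetD (h :: t) i 0]))
      (h, [])
    = (h + (t.take m).sum,
       (List.range m).map (fun k => h + (t.take (k + 1)).sum)) := by
  induction m with
  | zero => simp [PySem.List.pyRange_one_eq_nil]
  | succ n ih =>
    have hn : n ≤ t.length := Nat.le_of_succ_le hm
    have hsplit : PySem.List.pyRange 1 (1 + ((n : Nat) + 1 : Nat)) 1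
        = PySem.List.pyRange 1 (1 + (n : Int)) 1 ++ [1 + (n : Int)] := by
      push_cast
      rw [show (1 : Int) + ((n : Int) + 1) = (1 + (n : Int)) + 1 by ring,
        PySem.List.pyRange_one_succ_right (by omega)]
    rw [hsplit, List.foldl_append, ih hn]
    have hget : PySem.List.pyGetD (h :: t) (1 + (n : Int)) 0 = t[n]'(by omega) := by
      rw [show (1 : Int) + (n : Int) = ((n + 1 : Nat) : Int) by push_cast; ring,
        PySem.List.pyGetD_natCast]
      simp [List.getD, List.getElem?_eq_getElem (by omega : n < t.length)]
    have htake : (t.take (n + 1)).sum = (t.take n).sum + t[n]'(by omega) :=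
      List.sum_take_succ t n (by omega)
    simp only [List.foldl_cons, List.foldl_nil, hget, List.range_succ, List.map_append,
      List.map_cons, List.map_nil, htake]
    simp [add_assoc]

-- B's slice: lst[1:k+2] on (h :: t) is the first (k+1) elements of t.
theorem slice_tail_take (h : Int) (t : List Int) (k : Nat) :
    PySem.List.slice (h :: t) (some 1) (some ((1 + (k : Int)) + 1)) = t.take (k + 1) := by
  rw [show ((1 : Int) + (k : Int)) + 1 = ((k + 2 : Nat) : Int) by push_cast; ring]
  rw [PySem.List.slice_toNat]
  · norm_num
    omega
  · omega
  · omega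

-- ===== VERDICT (by name: the statement is the Claim_ definition above) =====
theorem add_all_spec : Claim_equal_add_all := by
  intro lst _ hpre
  unfold Spec_add_all add_all add_all_alt
  cases lst with
  | nil => exact absurd rfl hpre
  | cons h t =>
    simp only [List.length_cons]
    rw [show PySem.List.pyGetD (h :: t) 0 0 = h by simp [PySem.List.pyGetD, PySem.List.pyGet?, PySem.List.pyIdx?]]
    rw [show ((t.length + 1 : Nat) : Int) = 1 + (t.length : Int) by push_cast; ring,
      add_all_foldl_inv h t t.length (le_refl _), PySem.List.pyRange_one]
    rw [show ((1 : Int) + (t.length : Int) - 1).toNat = t.length by omega]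
    rw [List.map_map]
    apply List.map_congr_left
    intro k hk
    simp only [Function.comp]
    rw [slice_tail_take h t k]
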